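-- pv_equiv track=rewrite | github.com/Pooryamb/benchmark_structural_aligners4pfam_annotation | scripts/expand_sites_to_all_family_members.py | map_seed_poses2msa
-- ===== SOURCE A (Python) =====
-- gap_char = "."
--
-- def map_seed_poses2msa(msa_dict, all_sites_dict):
--     """The function takes two the MSAs parsed by parse_sto and also the dictionary of all
--     conserved columns as input and returns the the conserved columns in each family as output"""
--     all_sites = {}
--     # all_sites_data = {} # This was to check how often important sites align with each other
--     for pf, fam_sites_dict in all_sites_dict.items():
--         # fam_annotated_sites_num = [len(y) for y in fam_sites_dict.values()], # This was to check how often important sites align with each other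
--         # max_ann_col_count = sum(fam_annotated_sites_num)   # It happens when there is no overlap at all among the sites, # This was to check how often important sites align with each other
--         # min_ann_col_count = max(fam_annotated_sites_num)   # This is the minimum number of possible important sites in msa, # This was to check how often important sites align with each other
--         fam_sites = set()
--         fam_seq_dict = msa_dict[pf]
--
--         for seed_id, seed_sites in fam_sites_dict.items():
--             aligned_seed_seq = fam_seq_dict[seed_id]
--             seed_sites = fam_sites_dict[seed_id]
--             seed_pointer = -1
--             for msa_pointer in range(len(aligned_seed_seq)):
--                 if aligned_seed_seq[msa_pointer] != gap_char:
--                     seed_pointer += 1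
--                     ind_1_seed_pointer = seed_pointer + 1
--                     if ind_1_seed_pointer in seed_sites:
--                         fam_sites.add(msa_pointer + 1) # The stored indices start from 1
--         all_sites[pf] = sorted(list(fam_sites))
--         # all_sites_data[pf] = [min_ann_col_count, max_ann_col_count, len(fam_sites)] # This was to check how often important sites align with each other
--     return all_sites #, all_sites_data # This was to check how often important sites align with each other
-- ===== SOURCE B (Python) =====
-- gap_char = "."
--
-- def map_seed_poses2msa(msa_dict, all_sites_dict):
--     """Same mapping, but per seed we first build the list of 1-based MSA columns
--     that are not gaps, then look each conserved site up directly in that list."""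
--     all_sites = {}
--     for pf, fam_sites_dict in all_sites_dict.items():
--         fam_seq_dict = msa_dict[pf]
--         fam_sites = set()
--         for seed_id, seed_sites in fam_sites_dict.items():
--             seq = fam_seq_dict[seed_id]
--             positions = [i + 1 for i, c in enumerate(seq) if c != gap_char]
--             for s in seed_sites:
--                 if 1 <= s <= len(positions):
--                     fam_sites.add(positions[s - 1])
--         all_sites[pf] = sorted(fam_sites)
--     return all_sites
-- ===== Notes on version B (the rewrite author's own statement) =====
-- stated objective: alternative
-- what changed: Instead of scanning every MSA column while maintaining a running seed-position counter and testing membership of the counter in the site list, B builds the list of 1-based non-gap column indices once per seed and then looks each site up directly by index in that list.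
import Mathlib
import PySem

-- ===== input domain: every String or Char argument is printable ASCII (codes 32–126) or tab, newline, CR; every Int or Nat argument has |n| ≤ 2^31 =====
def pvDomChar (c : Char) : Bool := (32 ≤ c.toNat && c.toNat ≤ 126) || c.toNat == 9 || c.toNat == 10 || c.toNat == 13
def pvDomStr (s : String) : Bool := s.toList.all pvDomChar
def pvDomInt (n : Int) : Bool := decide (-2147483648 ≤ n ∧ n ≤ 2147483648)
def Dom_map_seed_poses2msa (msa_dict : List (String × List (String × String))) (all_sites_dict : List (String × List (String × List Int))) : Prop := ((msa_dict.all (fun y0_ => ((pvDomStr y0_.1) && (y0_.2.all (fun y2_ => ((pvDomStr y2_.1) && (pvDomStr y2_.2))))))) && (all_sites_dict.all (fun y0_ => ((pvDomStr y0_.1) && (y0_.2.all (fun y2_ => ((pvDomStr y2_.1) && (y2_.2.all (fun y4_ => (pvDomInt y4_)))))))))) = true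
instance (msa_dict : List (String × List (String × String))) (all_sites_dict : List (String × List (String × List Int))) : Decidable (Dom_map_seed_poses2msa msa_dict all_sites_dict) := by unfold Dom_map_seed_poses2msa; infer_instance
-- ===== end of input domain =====

-- B replaces A's per-column scan with a running seed-position counter by a per-seed
-- index of non-gap columns looked up directly per site (alternative decomposition, same results).

-- ===== PORT A =====
def map_seed_poses2msa (msa_dict : List (String × List (String × String))) (all_sites_dict : List (String × List (String × List Int))) : List (String × List Int) :=
  (all_sites_dict.foldl (fun all_sites pf_fsd =>
      let fam_sites_dict := pf_fsd.2
      let fam_seq_dict := ((PySem.Dict.mk msa_dict).get? pf_fsd.1).getD []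
      let fam_sites : PySem.Set Int :=
        fam_sites_dict.foldl (fun fam_sites sid_ss =>
            let aligned_seed_seq := (((PySem.Dict.mk fam_seq_dict).get? sid_ss.1).getD "").toList
            let seed_sites := ((PySem.Dict.mk fam_sites_dict).get? sid_ss.1).getD []
            ((PySem.List.pyRange 0 (PySem.List.len aligned_seed_seq)).foldl
              (fun (st : Int × PySem.Set Int) msa_pointer =>
                if PySem.List.pyGetD aligned_seed_seq msa_pointer '.' ≠ '.' then
                  let seed_pointer := st.1 + 1
                  let ind_1_seed_pointer := seed_pointer + 1
                  if ind_1_seed_pointer ∈ seed_sites then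
                    (seed_pointer, PySem.Set.add st.2 (msa_pointer + 1))
                  else (seed_pointer, st.2)
                else st)
              ((-1 : Int), fam_sites)).2)
          PySem.Set.empty
      all_sites.insert pf_fsd.1 (PySem.List.sorted fam_sites (fun x => x)))
    PySem.Dict.empty).items

-- ===== PORT B =====
def map_seed_poses2msa_alt (msa_dict : List (String × List (String × String))) (all_sites_dict : List (String × List (String × List Int))) : List (String × List Int) :=
  (all_sites_dict.foldl (fun all_sites pf_fsd =>
      let fam_seq_dict := ((PySem.Dict.mk msa_dict).get? pf_fsd.1).getD []
      let fam_sites : PySem.Set Int :=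
        pf_fsd.2.foldl (fun fam_sites sid_ss =>
            let seq := (((PySem.Dict.mk fam_seq_dict).get? sid_ss.1).getD "").toList
            let positions := (PySem.List.enumerate seq).filterMap
              (fun ic => if ic.2 ≠ '.' then some (ic.1 + 1) else none)
            sid_ss.2.foldl (fun fam_sites s =>
                if 1 ≤ s ∧ s ≤ PySem.List.len positions then
                  PySem.Set.add fam_sites (PySem.List.pyGetD positions (s - 1) 0)
                else fam_sites)
              fam_sites)
          PySem.Set.empty
      all_sites.insert pf_fsd.1 (PySem.List.sorted fam_sites (fun x => x)))
    PySem.Dict.empty).items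

-- ===== PRECONDITION & SPEC =====
-- Pre_ requires every family/seed lookup to succeed (Python raises KeyError otherwise) and —
-- because the arguments are Python dicts, which cannot carry duplicate keys — each inner
-- association list to have pairwise-distinct keys.
def Pre_map_seed_poses2msa (msa_dict : List (String × List (String × String))) (all_sites_dict : List (String × List (String × List Int))) : Prop :=
  all_sites_dict.all (fun p =>
    decide (p.2.map Prod.fst).Nodup &&
    (((PySem.Dict.mk msa_dict).get? p.1).elim false (fun fs =>
      p.2.all (fun q => ((PySem.Dict.mk fs).get? q.1).isSome)))) = true
instance (msa_dict : List (String × List (String × String))) (all_sites_dict : List (String × List (String × List Int))) : Decidable (Pre_map_seed_poses2msa msa_dict all_sites_dict) := by unfold Pre_map_seed_poses2msa; infer_instance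

def pvWitness_map_seed_poses2msa : (List (String × List (String × String))) × (List (String × List (String × List Int))) :=
  ([("PF1", [("s1", "A.C"), ("s2", "AAC")])], [("PF1", [("s1", [1, 2]), ("s2", [3])])])

def Spec_map_seed_poses2msa (msa_dict : List (String × List (String × String))) (all_sites_dict : List (String × List (String × List Int))) (out : List (String × List Int)) : Prop := out = map_seed_poses2msa_alt msa_dict all_sites_dict
instance (msa_dict : List (String × List (String × String))) (all_sites_dict : List (String × List (String × List Int))) (out : List (String × List Int)) : Decidable (Spec_map_seed_poses2msa msa_dict all_sites_dict out) := by unfold Spec_map_seed_poses2msa; infer_instance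

-- ===== CLAIM (what is proved, stated in full; the proofs are below) =====
def Claim_equal_map_seed_poses2msa : Prop := ∀ (msa_dict : List (String × List (String × String))) (all_sites_dict : List (String × List (String × List Int))), Dom_map_seed_poses2msa msa_dict all_sites_dict → Pre_map_seed_poses2msa msa_dict all_sites_dict → Spec_map_seed_poses2msa msa_dict all_sites_dict (map_seed_poses2msa msa_dict all_sites_dict)

-- ===== LEMMAS AND PROOFS =====

-- 1-based indices of the non-gap columns of cs, columns numbered from i.
def posFrom (i : Int) : List Char → List Int
  | [] => []
  | c :: t => if c ≠ '.' then (i + 1) :: posFrom (i + 1) t else posFrom (i + 1) t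

-- elements of ps whose 1-based rank (counted from b) lies in sites
def selSites (sites : List Int) (b : Int) : List Int → List Int
  | [] => []
  | q :: t => if b ∈ sites then q :: selSites sites (b + 1) t else selSites sites (b + 1) t

-- A's inner-loop body, on (index, char) pairs.
def stepA (sites : List Int) (st : Int × PySem.Set Int) (jc : Int × Char) : Int × PySem.Set Int :=
  if jc.2 ≠ '.' then
    if st.1 + 1 + 1 ∈ sites then (st.1 + 1, PySem.Set.add st.2 (jc.1 + 1))
    else (st.1 + 1, st.2)
  else st

lemma foldA_eq (cs : List Char) (sites : List Int) (init : Int × PySem.Set Int) :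
    (PySem.List.pyRange 0 (PySem.List.len cs)).foldl
      (fun (st : Int × PySem.Set Int) msa_pointer =>
        if PySem.List.pyGetD cs msa_pointer '.' ≠ '.' then
          let seed_pointer := st.1 + 1
          let ind_1_seed_pointer := seed_pointer + 1
          if ind_1_seed_pointer ∈ sites then
            (seed_pointer, PySem.Set.add st.2 (msa_pointer + 1))
          else (seed_pointer, st.2)
        else st) init
    = (PySem.List.enumerate cs).foldl (stepA sites) init := by
  rw [PySem.List.enumerate_eq_map_pyRange cs '.', List.foldl_map]
  rfl

lemma mem_selSites (sites : List Int) : ∀ (ps : List Int) (b x : Int),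
    x ∈ selSites sites b ps ↔ ∃ k : Nat, k < ps.length ∧ (b + k) ∈ sites ∧ ps[k]? = some x := by
  intro ps
  induction ps with
  | nil => simp [selSites]
  | cons q t ih =>
    intro b x
    have step : ∀ y : Int, (y ∈ selSites sites (b + 1) t ↔ ∃ k : Nat, k < t.length ∧ (b + 1 + k) ∈ sites ∧ t[k]? = some y) := fun y => ih (b + 1) y
    by_cases hb : b ∈ sites
    · simp only [selSites, if_pos hb, List.mem_cons, step]
      constructor
      · rintro (rfl | ⟨k, hk, hs, hg⟩)
        · exact ⟨0, by simp, by simpa using hb, by simp⟩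
        · refine ⟨k + 1, by simpa using hk, ?_, by simpa using hg⟩
          have e : b + ((k : Int) + 1) = b + 1 + k := by ring
          rw [show ((k + 1 : Nat) : Int) = (k : Int) + 1 by push_cast; ring, e]; exact hs
      · rintro ⟨k, hk, hs, hg⟩
        cases k with
        | zero => left; simp at hg; omega
        | succ k =>
          right
          refine ⟨k, by simpa using hk, ?_, by simpa using hg⟩
          have e : b + ((k : Int) + 1) = b + 1 + k := by ring
          rw [show ((k + 1 : Nat) : Int) = (k : Int) + 1 by push_cast; ring, e] at hs; exact hs
    · simp only [selSites, if_neg hb, step]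
      constructor
      · rintro ⟨k, hk, hs, hg⟩
        refine ⟨k + 1, by simpa using hk, ?_, by simpa using hg⟩
        have e : b + ((k : Int) + 1) = b + 1 + k := by ring
        rw [show ((k + 1 : Nat) : Int) = (k : Int) + 1 by push_cast; ring, e]; exact hs
      · rintro ⟨k, hk, hs, hg⟩
        cases k with
        | zero => exact absurd (by simpa using hs) hb
        | succ k =>
          refine ⟨k, by simpa using hk, ?_, by simpa using hg⟩
          have e : b + ((k : Int) + 1) = b + 1 + k := by ring
          rw [show ((k + 1 : Nat) : Int) = (k : Int) + 1 by push_cast; ring, e] at hs; exact hs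

lemma posFrom_eq_filterMap : ∀ (cs : List Char) (i : Int),
    (PySem.List.enumerate cs i).filterMap
        (fun ic : Int × Char => if ic.2 = '.' then none else some (ic.1 + 1))
      = posFrom i cs := by
  intro cs
  induction cs with
  | nil => intro i; simp [posFrom, PySem.List.enumerate]
  | cons c t ih =>
    intro i
    rw [PySem.List.enumerate_cons]
    by_cases h : c = '.'
    · simp [posFrom, h, ih]
    · simp [posFrom, h, ih]

lemma memA (sites : List Int) : ∀ (cs : List Char) (s p : Int) (S : PySem.Set Int) (x : Int),
    x ∈ ((PySem.List.enumerate cs s).foldl (stepA sites) (p, S)).2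
      ↔ x ∈ S ∨ x ∈ selSites sites (p + 2) (posFrom s cs) := by
  intro cs
  induction cs with
  | nil => intro s p S x; simp [PySem.List.enumerate, selSites, posFrom]
  | cons c t ih =>
    intro s p S x
    rw [PySem.List.enumerate_cons, List.foldl_cons]
    by_cases h : c = '.'
    · have hA : stepA sites (p, S) (s, c) = (p, S) := by simp [stepA, h]
      rw [hA, ih]
      simp [posFrom, h]
    · have hpos : posFrom s (c :: t) = (s + 1) :: posFrom (s + 1) t := by simp [posFrom, h]
      rw [hpos]
      by_cases hs : p + 1 + 1 ∈ sites
      · have hA : stepA sites (p, S) (s, c) = (p + 1, PySem.Set.add S (s + 1)) := by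
          simp [stepA, h, hs]
        rw [hA, ih]
        have hs' : p + 2 ∈ sites := by rwa [show p + 1 + 1 = p + 2 by ring] at hs
        have hsel : selSites sites (p + 2) ((s + 1) :: posFrom (s + 1) t)
            = (s + 1) :: selSites sites (p + 2 + 1) (posFrom (s + 1) t) := by
          simp [selSites, hs']
        rw [hsel, show p + 1 + 2 = p + 2 + 1 by ring]
        simp only [PySem.Set.mem_add, List.mem_cons]
        tauto
      · have hA : stepA sites (p, S) (s, c) = (p + 1, S) := by simp [stepA, h, hs]
        rw [hA, ih]
        have hs' : p + 2 ∉ sites := by rwa [show p + 1 + 1 = p + 2 by ring] at hs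
        have hsel : selSites sites (p + 2) ((s + 1) :: posFrom (s + 1) t)
            = selSites sites (p + 2 + 1) (posFrom (s + 1) t) := by
          simp [selSites, hs']
        rw [hsel, show p + 1 + 2 = p + 2 + 1 by ring]

-- membership after B's per-seed loop
lemma memB (ps : List Int) : ∀ (sites : List Int) (S : PySem.Set Int) (x : Int),
    x ∈ sites.foldl (fun fs s =>
          if 1 ≤ s ∧ s ≤ PySem.List.len ps then PySem.Set.add fs (PySem.List.pyGetD ps (s - 1) 0)
          else fs) S
      ↔ x ∈ S ∨ ∃ s ∈ sites, 1 ≤ s ∧ s ≤ (ps.length : Int) ∧ PySem.List.pyGetD ps (s - 1) 0 = x := by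
  intro sites
  induction sites with
  | nil => intro S x; simp
  | cons s0 rest ih =>
    intro S x
    rw [List.foldl_cons]
    by_cases hg : 1 ≤ s0 ∧ s0 ≤ PySem.List.len ps
    · rw [if_pos hg, ih]
      simp only [PySem.Set.mem_add, List.mem_cons, PySem.List.len] at hg ⊢
      constructor
      · rintro ((hx | rfl) | ⟨s, hmem, h1, h2, hval⟩)
        · exact Or.inl hx
        · exact Or.inr ⟨s0, Or.inl rfl, hg.1, hg.2, rfl⟩
        · exact Or.inr ⟨s, Or.inr hmem, h1, h2, hval⟩
      · rintro (hx | ⟨s, (rfl | hmem), h1, h2, hval⟩)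
        · exact Or.inl (Or.inl hx)
        · exact Or.inl (Or.inr hval.symm)
        · exact Or.inr ⟨s, hmem, h1, h2, hval⟩
    · rw [if_neg hg, ih]
      simp only [PySem.List.len] at hg
      constructor
      · rintro (hx | ⟨s, hmem, h1, h2, hval⟩)
        · exact Or.inl hx
        · exact Or.inr ⟨s, List.mem_cons_of_mem _ hmem, h1, h2, hval⟩
      · rintro (hx | ⟨s, hmem, h1, h2, hval⟩)
        · exact Or.inl hx
        · rcases List.mem_cons.mp hmem with rfl | hmem'
          · exact absurd ⟨h1, h2⟩ hg
          · exact Or.inr ⟨s, hmem', h1, h2, hval⟩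

lemma bridge (sites ps : List Int) (x : Int) :
    (∃ s ∈ sites, 1 ≤ s ∧ s ≤ (ps.length : Int) ∧ PySem.List.pyGetD ps (s - 1) 0 = x)
      ↔ x ∈ selSites sites 1 ps := by
  rw [mem_selSites]
  constructor
  · rintro ⟨s, hmem, h1, h2, hval⟩
    refine ⟨(s - 1).toNat, by omega, ?_, ?_⟩
    · rw [show (1 : Int) + ((s - 1).toNat : Int) = s by omega]; exact hmem
    · have h0 : (0 : Int) ≤ s - 1 := by omega
      have hlt : s - 1 < (ps.length : Int) := by omega
      rw [← hval, PySem.List.pyGetD_eq_getElem ps 0 h0 hlt,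
        List.getElem?_eq_getElem (by omega : (s - 1).toNat < ps.length)]
  · rintro ⟨k, hk, hmem, hg⟩
    refine ⟨1 + k, hmem, by omega, by omega, ?_⟩
    rw [show (1 : Int) + k - 1 = (k : Int) by omega, PySem.List.pyGetD_natCast,
      List.getD_eq_getElem?_getD, hg]
    rfl

-- first-match lookup returns the entry itself when keys are distinct
lemma get?_mk_of_nodup {ν : Type} : ∀ (l : List (String × ν)), (l.map Prod.fst).Nodup →
    ∀ q ∈ l, (PySem.Dict.mk l).get? q.1 = some q.2 := by
  intro l
  induction l with
  | nil => intro _ q hq; cases hq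
  | cons a t ih =>
    intro hnd q hq
    rw [List.map_cons, List.nodup_cons] at hnd
    rcases List.mem_cons.mp hq with rfl | hq'
    · rw [PySem.Dict.get?_mk_cons]; simp
    · rw [PySem.Dict.get?_mk_cons]
      have hne : (a.1 == q.1) ≠ true := by
        intro hbe
        exact hnd.1 (by
          have : a.1 = q.1 := by simpa using hbe
          exact this ▸ List.mem_map_of_mem hq')
      rw [if_neg hne]
      exact ih hnd.2 q hq'

lemma nodup_foldA (sites : List Int) : ∀ (l : List (Int × Char)) (p : Int) (S : PySem.Set Int),
    S.Nodup → ((l.foldl (stepA sites) (p, S)).2).Nodup := by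
  intro l
  induction l with
  | nil => intro p S h; exact h
  | cons jc t ih =>
    intro p S h
    rw [List.foldl_cons]
    unfold stepA
    split_ifs with h1 h2
    · exact ih _ _ (PySem.Set.nodup_add _ _ h)
    · exact ih _ _ h
    · exact ih _ _ h

lemma nodup_foldB (ps : List Int) : ∀ (sites : List Int) (S : PySem.Set Int),
    S.Nodup →
    (sites.foldl (fun fs s =>
        if 1 ≤ s ∧ s ≤ PySem.List.len ps then PySem.Set.add fs (PySem.List.pyGetD ps (s - 1) 0)
        else fs) S).Nodup := by
  intro sites
  induction sites with
  | nil => intro S h; exact h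
  | cons s0 t ih =>
    intro S h
    rw [List.foldl_cons]
    split_ifs with h1
    · exact ih _ (PySem.Set.nodup_add _ _ h)
    · exact ih _ h

-- per-seed: A's scan and B's lookup loop add the same elements
lemma seed_mem_eq (cs : List Char) (sites : List Int) (S1 S2 : PySem.Set Int)
    (hmem : ∀ x, x ∈ S1 ↔ x ∈ S2) (x : Int) :
    x ∈ ((PySem.List.enumerate cs).foldl (stepA sites) ((-1 : Int), S1)).2 ↔
    x ∈ sites.foldl (fun fs s =>
          if 1 ≤ s ∧ s ≤ PySem.List.len
              ((PySem.List.enumerate cs).filterMap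
                (fun ic : Int × Char => if ic.2 = '.' then none else some (ic.1 + 1)))
            then PySem.Set.add fs (PySem.List.pyGetD
              ((PySem.List.enumerate cs).filterMap
                (fun ic : Int × Char => if ic.2 = '.' then none else some (ic.1 + 1))) (s - 1) 0)
          else fs) S2 := by
  rw [memA, memB, posFrom_eq_filterMap, bridge, hmem,
    show (-1 : Int) + 2 = 1 by ring]

-- family level: the two inner folds over the seed list agree as sets
lemma fam_fold (fam_seq_dict : List (String × String)) (fsd : List (String × List Int)) :
    ∀ (l : List (String × List Int)),
      (∀ q ∈ l, (PySem.Dict.mk fsd).get? q.1 = some q.2) →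
      ∀ (S1 S2 : PySem.Set Int), S1.Nodup → S2.Nodup → (∀ x, x ∈ S1 ↔ x ∈ S2) →
      (let R1 := l.foldl (fun fam_sites sid_ss =>
            let aligned_seed_seq := (((PySem.Dict.mk fam_seq_dict).get? sid_ss.1).getD "").toList
            let seed_sites := ((PySem.Dict.mk fsd).get? sid_ss.1).getD []
            ((PySem.List.pyRange 0 (PySem.List.len aligned_seed_seq)).foldl
              (fun (st : Int × PySem.Set Int) msa_pointer =>
                if PySem.List.pyGetD aligned_seed_seq msa_pointer '.' ≠ '.' then
                  let seed_pointer := st.1 + 1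
                  let ind_1_seed_pointer := seed_pointer + 1
                  if ind_1_seed_pointer ∈ seed_sites then
                    (seed_pointer, PySem.Set.add st.2 (msa_pointer + 1))
                  else (seed_pointer, st.2)
                else st)
              ((-1 : Int), fam_sites)).2) S1
       let R2 := l.foldl (fun fam_sites sid_ss =>
            let seq := (((PySem.Dict.mk fam_seq_dict).get? sid_ss.1).getD "").toList
            let positions := (PySem.List.enumerate seq).filterMap
              (fun ic => if ic.2 ≠ '.' then some (ic.1 + 1) else none)
            sid_ss.2.foldl (fun fam_sites s =>
                if 1 ≤ s ∧ s ≤ PySem.List.len positions then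
                  PySem.Set.add fam_sites (PySem.List.pyGetD positions (s - 1) 0)
                else fam_sites)
              fam_sites) S2
       R1.Nodup ∧ R2.Nodup ∧ ∀ x, x ∈ R1 ↔ x ∈ R2) := by
  intro l
  induction l with
  | nil =>
    intro _ S1 S2 h1 h2 hm
    exact ⟨h1, h2, hm⟩
  | cons q t ih =>
    intro hlk S1 S2 h1 h2 hm
    simp only [List.foldl_cons]
    have hq := hlk q (List.mem_cons_self ..)
    have hseed : ((PySem.Dict.mk fsd).get? q.1).getD [] = q.2 := by rw [hq]; rfl
    set cs := (((PySem.Dict.mk fam_seq_dict).get? q.1).getD "").toList with hcs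
    have hfe := foldA_eq cs q.2 ((-1 : Int), S1)
    refine ih (fun r hr => hlk r (List.mem_cons_of_mem _ hr)) _ _ ?_ ?_ ?_
    · simp only [hseed]
      rw [hfe]
      exact nodup_foldA _ _ _ _ h1
    · exact nodup_foldB _ _ _ h2
    · intro x
      simp only [hseed]
      rw [hfe]
      have := seed_mem_eq cs q.2 S1 S2 hm x
      rw [this]
      simp only [ne_eq, ite_not]

-- two Nodup Int lists with equal membership have the same sorted output
lemma sorted_eq_of_mem_nodup (R1 R2 : List Int) (h1 : R1.Nodup) (h2 : R2.Nodup)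
    (hm : ∀ x, x ∈ R1 ↔ x ∈ R2) :
    PySem.List.sorted R1 (fun x => x) = PySem.List.sorted R2 (fun x => x) := by
  have hperm : R1.Perm R2 := (List.perm_ext_iff_of_nodup h1 h2).mpr hm
  exact (PySem.List.sorted_id_eq_of_perm_of_pairwise R2 (PySem.List.sorted R1 (fun x => x))
    ((PySem.List.sorted_perm R1 (fun x => x) false).trans hperm)
    (PySem.List.sorted_pairwise R1 (fun x => x))).symm

-- ===== VERDICT (by name: the statement is the Claim_ definition above) =====
theorem map_seed_poses2msa_spec : Claim_equal_map_seed_poses2msa := by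
  intro msa_dict all_sites_dict _ hpre
  unfold Spec_map_seed_poses2msa map_seed_poses2msa map_seed_poses2msa_alt
  unfold Pre_map_seed_poses2msa at hpre
  simp only [List.all_eq_true, Bool.and_eq_true, decide_eq_true_eq] at hpre
  congr 1
  apply PySem.List.foldl_congr_mem
  intro d p hp
  rcases hpre p hp with ⟨hnd, helim⟩
  have hlk : ∀ q ∈ p.2, (PySem.Dict.mk p.2).get? q.1 = some q.2 :=
    get?_mk_of_nodup p.2 hnd
  have hff := fam_fold (((PySem.Dict.mk msa_dict).get? p.1).getD []) p.2 p.2 hlk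
    PySem.Set.empty PySem.Set.empty List.nodup_nil List.nodup_nil (fun _ => Iff.rfl)
  show PySem.Dict.insert d p.1 _ = PySem.Dict.insert d p.1 _
  exact congrArg (PySem.Dict.insert d p.1)
    (sorted_eq_of_mem_nodup _ _ hff.1 hff.2.1 hff.2.2)
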